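-- pv_equiv track=rewrite | github.com/stoyan-koychev/sgnl-cli | python/split.py | _escape_multiline_links
-- ===== SOURCE A (Python) =====
-- def _escape_multiline_links(md: str) -> str:
--     """Escape newlines inside markdown link text.
--
--     When an <a> tag spans multiple lines, the resulting markdown link text
--     contains literal newlines which break most markdown parsers.  Insert a
--     backslash before each newline inside ``[...]`` to preserve the link as
--     a single token.
--     """
--     link_open_count = 0
--     out: list[str] = []
--     for ch in md:
--         if ch == '[':
--             link_open_count += 1
--         elif ch == ']':
--             link_open_count = max(0, link_open_count - 1)
--         if link_open_count > 0 and ch == '\n':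
--             out.append('\\\n')
--         else:
--             out.append(ch)
--     return ''.join(out)
-- ===== SOURCE B (Python) =====
-- def _escape_multiline_links(md: str) -> str:
--     # Line-based decomposition: split on '\n', track bracket depth per line,
--     # and choose the separator ('\\\n' vs '\n') at each line boundary.
--     lines = md.split('\n')
--
--     def depth_after(d: int, line: str) -> int:
--         for ch in line:
--             if ch == '[':
--                 d += 1
--             elif ch == ']':
--                 d = max(0, d - 1)
--         return d
--
--     parts = [lines[0]]
--     depth = depth_after(0, lines[0])
--     for line in lines[1:]:
--         parts.append('\\\n' if depth > 0 else '\n')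
--         parts.append(line)
--         depth = depth_after(depth, line)
--     return ''.join(parts)
-- ===== Notes on version B (the rewrite author's own statement) =====
-- stated objective: alternative
-- what changed: Replaces the per-character output loop (clamped depth counter deciding each emitted character) by a split-on-newline decomposition: lines are emitted verbatim via str.split/str.join and only the separator at each line boundary is chosen from the bracket depth accumulated per line.
import Mathlib
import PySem

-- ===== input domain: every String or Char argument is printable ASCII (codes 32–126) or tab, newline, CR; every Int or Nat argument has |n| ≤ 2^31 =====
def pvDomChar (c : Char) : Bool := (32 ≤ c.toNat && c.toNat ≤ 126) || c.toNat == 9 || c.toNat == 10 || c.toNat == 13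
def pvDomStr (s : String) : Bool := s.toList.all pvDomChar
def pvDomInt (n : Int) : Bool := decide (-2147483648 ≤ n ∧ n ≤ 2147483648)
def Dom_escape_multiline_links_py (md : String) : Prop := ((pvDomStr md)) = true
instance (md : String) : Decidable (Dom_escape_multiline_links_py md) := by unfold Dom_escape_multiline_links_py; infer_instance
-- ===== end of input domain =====

-- B replaces A's per-character output loop by a split-on-'\n' decomposition (alternative structure, same cost).

-- ===== PORT A =====
-- per-character fold: clamped bracket counter, each character emitted (escaped if a newline inside brackets)
def escape_multiline_links_py (md : String) : String :=
  let r := md.toList.foldl (fun (st : Int × List (List Char)) ch =>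
    let cnt := if ch = '[' then st.1 + 1 else if ch = ']' then max 0 (st.1 - 1) else st.1
    (cnt, st.2 ++ [if cnt > 0 ∧ ch = '\n' then ['\\', '\n'] else [ch]])) (0, [])
  String.mk (PySem.Chars.join [] r.2)

-- ===== PORT B =====
-- depth_after(d, line): bracket depth after scanning one (newline-free) line
def pvDepthAfter (d : Int) (line : List Char) : Int :=
  line.foldl (fun d ch => if ch = '[' then d + 1 else if ch = ']' then max 0 (d - 1) else d) d

def escape_multiline_links_py_alt (md : String) : String :=
  match PySem.Chars.splitOn md.toList ['\n'] with
  | [] => ""   -- unreachable: split never returns an empty list (Python's lines[0] is always defined)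
  | first :: rest =>
    let r := rest.foldl (fun (st : Int × List (List Char)) line =>
        (pvDepthAfter st.1 line,
         st.2 ++ [if st.1 > 0 then ['\\', '\n'] else ['\n']] ++ [line]))
      (pvDepthAfter 0 first, [first])
    String.mk (PySem.Chars.join [] r.2)

-- ===== PRECONDITION & SPEC =====
def Spec_escape_multiline_links_py (md : String) (out : String) : Prop := out = escape_multiline_links_py_alt md
instance (md : String) (out : String) : Decidable (Spec_escape_multiline_links_py md out) := by unfold Spec_escape_multiline_links_py; infer_instance

-- ===== CLAIM (what is proved, stated in full; the proofs are below) =====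
def Claim_equal_escape_multiline_links_py : Prop := ∀ (md : String), Dom_escape_multiline_links_py md → Spec_escape_multiline_links_py md (escape_multiline_links_py md)

-- ===== LEMMAS AND PROOFS =====

-- proof-side canonical per-character transformer (A's semantics)
def pvG (d : Int) : List Char → List Char
  | [] => []
  | c :: cs =>
    let d' := if c = '[' then d + 1 else if c = ']' then max 0 (d - 1) else d
    (if d' > 0 ∧ c = '\n' then ['\\', '\n'] else [c]) ++ pvG d' cs

-- proof-side split on '\n'
def pvSplit : List Char → List (List Char)
  | [] => [[]]
  | c :: cs => if c = '\n' then [] :: pvSplit cs else (pvSplit cs).modifyHead (c :: ·)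

-- proof-side renderer of B's line loop
def pvRenderTail (d : Int) : List (List Char) → List Char
  | [] => []
  | l :: ls => (if d > 0 then ['\\', '\n'] else ['\n']) ++ l ++ pvRenderTail (pvDepthAfter d l) ls

def pvRender (d : Int) (ls : List (List Char)) : List Char :=
  match ls with
  | [] => []
  | l :: ls => l ++ pvRenderTail (pvDepthAfter d l) ls

theorem pvJoinNil (ps : List (List Char)) : PySem.Chars.join [] ps = ps.flatten := by
  induction ps with
  | nil => rfl
  | cons p ps ih =>
    cases ps with
    | nil => simp [PySem.Chars.join, List.intercalate]
    | cons q qs =>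
      simp only [PySem.Chars.join, List.intercalate, List.intersperse] at ih ⊢
      simp [ih]

theorem pvSplit_ne_nil (s : List Char) : pvSplit s ≠ [] := by
  induction s with
  | nil => simp [pvSplit]
  | cons c cs ih =>
    by_cases h : c = '\n'
    · simp [pvSplit, h]
    · cases hs : pvSplit cs with
      | nil => exact absurd hs ih
      | cons l ls => simp [pvSplit, h, hs, List.modifyHead]

theorem pvGo_spec (l : List Char) : ∀ (fuel : Nat), l.length < fuel → ∀ (cur : List Char) (acc : List (List Char)),
    PySem.Chars.splitOn.go ['\n'] fuel l cur acc
      = acc.reverse ++ (pvSplit l).modifyHead (cur.reverse ++ ·) := by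
  induction l with
  | nil =>
    intro fuel h cur acc
    obtain ⟨k, rfl⟩ : ∃ k, fuel = k + 1 := ⟨fuel - 1, by omega⟩
    simp [PySem.Chars.splitOn.go, pvSplit, List.modifyHead]
  | cons c rest ih =>
    intro fuel h cur acc
    obtain ⟨k, rfl⟩ : ∃ k, fuel = k + 1 := ⟨fuel - 1, by omega⟩
    have hk : rest.length < k := by simpa using h
    by_cases hc : c = '\n'
    · subst hc
      have : PySem.Chars.splitOn.go ['\n'] (k+1) ('\n'::rest) cur acc
          = PySem.Chars.splitOn.go ['\n'] k rest [] (cur.reverse :: acc) := by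
        simp [PySem.Chars.splitOn.go, List.isPrefixOf]
      rw [this, ih k hk [] (cur.reverse :: acc)]
      cases hs : pvSplit rest with
      | nil => exact absurd hs (pvSplit_ne_nil rest)
      | cons l ls => simp [pvSplit, hs, List.modifyHead]
    · have : PySem.Chars.splitOn.go ['\n'] (k+1) (c::rest) cur acc
          = PySem.Chars.splitOn.go ['\n'] k rest (c :: cur) acc := by
        simp [PySem.Chars.splitOn.go, List.isPrefixOf, Ne.symm hc]
      rw [this, ih k hk (c :: cur) acc]
      cases hs : pvSplit rest with
      | nil => exact absurd hs (pvSplit_ne_nil rest)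
      | cons l ls => simp [pvSplit, hc, hs, List.modifyHead]

theorem pvSplitOn_newline (s : List Char) : PySem.Chars.splitOn s ['\n'] = pvSplit s := by
  have h := pvGo_spec s (s.length + 1) (by omega) [] []
  cases hs : pvSplit s with
  | nil => exact absurd hs (pvSplit_ne_nil s)
  | cons l ls => rw [hs] at h; simpa [PySem.Chars.splitOn, List.modifyHead] using h

-- A's fold, flattened, is pvG
theorem pvFoldA_spec (cs : List Char) : ∀ (d : Int) (parts : List (List Char)),
    (cs.foldl (fun (st : Int × List (List Char)) ch =>
      let cnt := if ch = '[' then st.1 + 1 else if ch = ']' then max 0 (st.1 - 1) else st.1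
      (cnt, st.2 ++ [if cnt > 0 ∧ ch = '\n' then ['\\', '\n'] else [ch]])) (d, parts)).2.flatten
      = parts.flatten ++ pvG d cs := by
  induction cs with
  | nil => intro d parts; simp [pvG]
  | cons c cs ih =>
    intro d parts
    simp only [List.foldl_cons]
    rw [ih]
    simp [pvG]

-- B's fold, flattened, is pvRenderTail
theorem pvFoldB_spec (ls : List (List Char)) : ∀ (d : Int) (parts : List (List Char)),
    (ls.foldl (fun (st : Int × List (List Char)) line =>
        (pvDepthAfter st.1 line,
         st.2 ++ [if st.1 > 0 then ['\\', '\n'] else ['\n']] ++ [line])) (d, parts)).2.flatten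
      = parts.flatten ++ pvRenderTail d ls := by
  induction ls with
  | nil => intro d parts; simp [pvRenderTail]
  | cons l ls ih =>
    intro d parts
    simp only [List.foldl_cons]
    rw [ih]
    simp [pvRenderTail]

theorem pvDepthAfter_cons (d : Int) (c : Char) (l : List Char) :
    pvDepthAfter d (c :: l)
      = pvDepthAfter (if c = '[' then d + 1 else if c = ']' then max 0 (d - 1) else d) l := rfl

-- the heart: A's per-character output equals B's line-based rendering
theorem pvG_eq_render (s : List Char) : ∀ (d : Int), pvG d s = pvRender d (pvSplit s) := by
  induction s with
  | nil => intro d; simp [pvG, pvSplit, pvRender, pvRenderTail]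
  | cons c cs ih =>
    intro d
    by_cases hc : c = '\n'
    · subst hc
      cases hs : pvSplit cs with
      | nil => exact absurd hs (pvSplit_ne_nil cs)
      | cons l ls =>
        have hrec := ih d
        rw [hs] at hrec
        simp only [pvG, pvSplit, pvRender, pvDepthAfter]
        simp only [show ('\n' = '[') = False by simp, show ('\n' = ']') = False by simp]
        simp [hs, pvRenderTail, hrec, pvRender]
    · cases hs : pvSplit cs with
      | nil => exact absurd hs (pvSplit_ne_nil cs)
      | cons l ls =>
        have hrec := ih (if c = '[' then d + 1 else if c = ']' then max 0 (d - 1) else d)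
        rw [hs] at hrec
        simp only [pvG, pvSplit, hc, if_false, hs, List.modifyHead, pvRender]
        simp only [pvRender] at hrec
        simp [hrec, pvDepthAfter_cons]

-- ===== VERDICT (by name: the statement is the Claim_ definition above) =====
theorem escape_multiline_links_py_spec : Claim_equal_escape_multiline_links_py := by
  intro md _
  unfold Spec_escape_multiline_links_py escape_multiline_links_py escape_multiline_links_py_alt
  rw [pvSplitOn_newline]
  cases hs : pvSplit md.toList with
  | nil => exact absurd hs (pvSplit_ne_nil md.toList)
  | cons first rest =>
    simp only [pvJoinNil]
    rw [pvFoldA_spec, pvFoldB_spec]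
    have := pvG_eq_render md.toList 0
    rw [hs] at this
    simp only [pvRender] at this
    simp [this]
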